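-- pv_equiv track=rewrite | github.com/anubhab001/baksheesh | reference-software/baksheesh_zorro_128bitT.py | apply_sbox_layer
-- ===== SOURCE A (Python) =====
-- from typing import List, Sequence
--
-- SBOX_3BIT = [1, 0, 3, 6, 5, 2, 4, 7]
--
-- TMATRIX_4x4 = [
--     [1, 1, 0, 0],  # y3 = x3 ⊕ z2
--     [1, 0, 1, 0],  # y2 = x3 ⊕ z1
--     [1, 0, 0, 1],  # y1 = x3 ⊕ z0
--     [1, 0, 1, 1],  # y0 = x3 ⊕ z1 ⊕ z0
-- ]
--
-- def apply_sbox_layer(state_nibbles: Sequence[int]) -> List[int]: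
--     """
--     Apply 3-bit S-box layer to all 32 nibbles, then combine with T-matrix.
--
--     This implementation applies the 128×128 T-matrix to the entire state:
--     - Extract x3 bits from all 32 nibbles (32 bits)
--     - Apply 3-bit S-box to lower 3 bits of all 32 nibbles (96 bits output)
--     - Combine with 128×128 T-matrix: [x3_0, z2_0, z1_0, z0_0, x3_1, z2_1, ..., z0_31]
--     """
--     output_nibbles = []
--
--     for nibble in state_nibbles:
--         # Extract bits
--         x0 = (nibble >> 0) & 1
--         x1 = (nibble >> 1) & 1
--         x2 = (nibble >> 2) & 1
--         x3 = (nibble >> 3) & 1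
--
--         # Stage 1: Apply 3-bit S-box to lower 3 bits
--         inp_3bit = (x2 << 2) | (x1 << 1) | x0
--         s3_out = SBOX_3BIT[inp_3bit]
--
--         z0 = (s3_out >> 0) & 1
--         z1 = (s3_out >> 1) & 1
--         z2 = (s3_out >> 2) & 1
--
--         # Stage 2: Apply 4×4 T-matrix block
--         # Input: [x3, z2, z1, z0]
--         # Output: [y3, y2, y1, y0]
--         input_vec = [x3, z2, z1, z0]
--         output_bits = []
--         for row in TMATRIX_4x4:
--             bit = sum(row[i] * input_vec[i] for i in range(4)) % 2
--             output_bits.append(bit)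
--
--         # Convert to nibble
--         output_nibble = (output_bits[0] << 3) | (output_bits[1] << 2) | \
--                        (output_bits[2] << 1) | output_bits[3]
--         output_nibbles.append(output_nibble)
--
--     return output_nibbles
-- ===== SOURCE B (Python) =====
-- from typing import List, Sequence
--
-- SBOX_3BIT = [1, 0, 3, 6, 5, 2, 4, 7]
--
--
-- def _build_lut() -> List[int]:
--     """Run the S-box + T-matrix bit logic once for every nibble value 0..15."""
--     lut = []
--     for v in range(16):
--         x3 = v // 8
--         s3 = SBOX_3BIT[v % 8]
--         z0 = s3 % 2
--         z1 = (s3 // 2) % 2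
--         z2 = (s3 // 4) % 2
--         y3 = x3 ^ z2
--         y2 = x3 ^ z1
--         y1 = x3 ^ z0
--         y0 = x3 ^ z1 ^ z0
--         lut.append((y3 << 3) | (y2 << 2) | (y1 << 1) | y0)
--     return lut
--
--
-- _LUT = _build_lut()
--
--
-- def apply_sbox_layer(state_nibbles: Sequence[int]) -> List[int]:
--     return [_LUT[n % 16] for n in state_nibbles]
-- ===== Notes on version B (the rewrite author's own statement) =====
-- stated objective: faster
-- what changed: B precomputes a 16-entry lookup table (built once by the same S-box + T-matrix bit logic over nibble values 0..15) and the main pass becomes a single table lookup per nibble via n % 16, removing all per-element bit extraction and matrix arithmetic.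
import Mathlib
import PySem

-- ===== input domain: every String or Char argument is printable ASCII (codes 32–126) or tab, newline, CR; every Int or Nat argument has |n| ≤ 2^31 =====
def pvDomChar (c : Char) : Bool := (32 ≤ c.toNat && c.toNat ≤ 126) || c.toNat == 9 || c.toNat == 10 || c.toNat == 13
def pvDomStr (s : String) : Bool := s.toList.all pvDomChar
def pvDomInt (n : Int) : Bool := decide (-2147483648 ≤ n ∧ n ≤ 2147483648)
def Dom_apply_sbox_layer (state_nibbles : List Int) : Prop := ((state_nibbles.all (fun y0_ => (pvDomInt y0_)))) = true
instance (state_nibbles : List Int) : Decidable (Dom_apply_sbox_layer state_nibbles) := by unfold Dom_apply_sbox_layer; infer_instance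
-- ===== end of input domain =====

-- B replaces the per-element S-box + T-matrix bit arithmetic by a 16-entry lookup
-- table built once by the same bit logic; the main pass is a single table lookup per nibble.

-- ===== PORT A =====
def SBOX_3BIT : List Int := [1, 0, 3, 6, 5, 2, 4, 7]

def TMATRIX_4x4 : List (List Int) := [[1,1,0,0],[1,0,1,0],[1,0,0,1],[1,0,1,1]]

-- the body of A's loop, one nibble (bits extracted, then the two stages)
def sboxCoreA (x0 x1 x2 x3 : Int) : Int :=
  let inp_3bit := Int.lor (Int.lor (Int.shiftLeft x2 2) (Int.shiftLeft x1 1)) x0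
  let s3_out := (PySem.List.pyGet? SBOX_3BIT inp_3bit).getD 0
  let z0 := PySem.Int.mod (PySem.Int.floordiv s3_out 1) 2
  let z1 := PySem.Int.mod (PySem.Int.floordiv s3_out 2) 2
  let z2 := PySem.Int.mod (PySem.Int.floordiv s3_out 4) 2
  let input_vec : List Int := [x3, z2, z1, z0]
  let output_bits : List Int := TMATRIX_4x4.foldl (fun bits row =>
    bits ++ [PySem.Int.mod ((PySem.List.pyRange 0 4 1).foldl (fun s i =>
      s + ((PySem.List.pyGet? row i).getD 0) * ((PySem.List.pyGet? input_vec i).getD 0)) 0) 2]) []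
  Int.lor (Int.lor (Int.lor (Int.shiftLeft (output_bits.getD 0 0) 3)
    (Int.shiftLeft (output_bits.getD 1 0) 2)) (Int.shiftLeft (output_bits.getD 2 0) 1))
    (output_bits.getD 3 0)

def sboxNibbleA (nibble : Int) : Int :=
  let x0 := PySem.Int.mod (PySem.Int.floordiv nibble 1) 2
  let x1 := PySem.Int.mod (PySem.Int.floordiv nibble 2) 2
  let x2 := PySem.Int.mod (PySem.Int.floordiv nibble 4) 2
  let x3 := PySem.Int.mod (PySem.Int.floordiv nibble 8) 2
  sboxCoreA x0 x1 x2 x3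

def apply_sbox_layer (state_nibbles : List Int) : List Int :=
  state_nibbles.foldl (fun output_nibbles nibble => output_nibbles ++ [sboxNibbleA nibble]) []

-- ===== PORT B =====
-- the one-time table construction (Source B's _build_lut loop)
def pvLUT : List Int :=
  (PySem.List.pyRange 0 16 1).foldl (fun lut v =>
    let x3 := PySem.Int.floordiv v 8
    let s3 := (PySem.List.pyGet? SBOX_3BIT (PySem.Int.mod v 8)).getD 0
    let z0 := PySem.Int.mod s3 2
    let z1 := PySem.Int.mod (PySem.Int.floordiv s3 2) 2
    let z2 := PySem.Int.mod (PySem.Int.floordiv s3 4) 2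
    let y3 := Int.xor x3 z2
    let y2 := Int.xor x3 z1
    let y1 := Int.xor x3 z0
    let y0 := Int.xor (Int.xor x3 z1) z0
    lut ++ [Int.lor (Int.lor (Int.lor (Int.shiftLeft y3 3) (Int.shiftLeft y2 2)) (Int.shiftLeft y1 1)) y0]) []

def apply_sbox_layer_alt (state_nibbles : List Int) : List Int :=
  state_nibbles.map (fun n => (PySem.List.pyGet? pvLUT (PySem.Int.mod n 16)).getD 0)

-- ===== PRECONDITION & SPEC =====
def Spec_apply_sbox_layer (state_nibbles : List Int) (out : List Int) : Prop := out = apply_sbox_layer_alt state_nibbles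
instance (state_nibbles : List Int) (out : List Int) : Decidable (Spec_apply_sbox_layer state_nibbles out) := by unfold Spec_apply_sbox_layer; infer_instance

-- ===== CLAIM (what is proved, stated in full; the proofs are below) =====
def Claim_equal_apply_sbox_layer : Prop := ∀ (state_nibbles : List Int), Dom_apply_sbox_layer state_nibbles → Spec_apply_sbox_layer state_nibbles (apply_sbox_layer state_nibbles)

-- ===== LEMMAS AND PROOFS =====

-- A's append-fold is the map of its loop body
theorem foldlA_eq_map (xs : List Int) (acc : List Int) :
    xs.foldl (fun output_nibbles nibble => output_nibbles ++ [sboxNibbleA nibble]) acc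
      = acc ++ xs.map sboxNibbleA := by
  induction xs generalizing acc with
  | nil => simp
  | cons x xs ih => simp [List.foldl, ih]

-- bridges from PySem floor arithmetic to Int's '/' and '%' (divisors positive)
theorem pvMod2 (a : Int) : PySem.Int.mod a 2 = a % 2 := PySem.Int.mod_eq_emod_of_pos (by norm_num)
theorem pvMod16 (a : Int) : PySem.Int.mod a 16 = a % 16 := PySem.Int.mod_eq_emod_of_pos (by norm_num)
theorem pvFd1 (a : Int) : PySem.Int.floordiv a 1 = a / 1 := PySem.Int.floordiv_eq_ediv_of_pos (by norm_num)
theorem pvFd2 (a : Int) : PySem.Int.floordiv a 2 = a / 2 := PySem.Int.floordiv_eq_ediv_of_pos (by norm_num)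
theorem pvFd4 (a : Int) : PySem.Int.floordiv a 4 = a / 4 := PySem.Int.floordiv_eq_ediv_of_pos (by norm_num)
theorem pvFd8 (a : Int) : PySem.Int.floordiv a 8 = a / 8 := PySem.Int.floordiv_eq_ediv_of_pos (by norm_num)

-- the per-nibble function only looks at the nibble modulo 16
theorem sboxNibbleA_mod (n : Int) : sboxNibbleA n = sboxNibbleA (PySem.Int.mod n 16) := by
  unfold sboxNibbleA
  simp only [pvMod16, pvFd1, pvFd2, pvFd4, pvFd8, pvMod2]
  congr 1 <;> omega

-- every nibble value 0..15 gets the table entry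
theorem sboxNibbleA_lut (r : Int) (h0 : 0 ≤ r) (h1 : r < 16) :
    sboxNibbleA r = (PySem.List.pyGet? pvLUT r).getD 0 := by
  interval_cases r <;> decide

theorem sbox_pointwise (n : Int) :
    sboxNibbleA n = (PySem.List.pyGet? pvLUT (PySem.Int.mod n 16)).getD 0 := by
  rw [sboxNibbleA_mod]
  exact sboxNibbleA_lut _ (by rw [pvMod16]; exact Int.emod_nonneg n (by norm_num))
    (by rw [pvMod16]; exact Int.emod_lt_of_pos n (by norm_num))

-- ===== VERDICT (by name: the statement is the Claim_ definition above) =====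
theorem apply_sbox_layer_spec : Claim_equal_apply_sbox_layer := by
  intro xs _
  show _ = _
  rw [apply_sbox_layer, foldlA_eq_map, List.nil_append, apply_sbox_layer_alt]
  exact List.map_congr_left (fun n _ => sbox_pointwise n)
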